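-- pv_equiv track=rewrite | github.com/Amona2120/codewars | 6 kyu/[6 kyu] Consecutive strings.py | longest_consec
-- ===== SOURCE A (Python) =====
-- def longest_consec(strarr, k):
--     if len(strarr) == 0 or k <= 0: return ""
--     max_str = ""
--     for i in range(len(strarr)-k+1):
--         a = "".join(strarr[:k])
--         if len(a) > len(max_str):
--             max_str = a
--         del strarr[0]
--     return max_str
-- ===== SOURCE B (Python) =====
-- def longest_consec(strarr, k):
--     n = len(strarr)
--     if n == 0 or k <= 0 or k > n:
--         return ""
--     pref = [0]
--     for s in strarr:
--         pref.append(pref[-1] + len(s))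
--     best = 0
--     best_sum = pref[k] - pref[0]
--     for i in range(1, n - k + 1):
--         cur = pref[i + k] - pref[i]
--         if cur > best_sum:
--             best, best_sum = i, cur
--     return "".join(strarr[best:best + k])
-- ===== Notes on version B (the rewrite author's own statement) =====
-- stated objective: faster
-- what changed: B replaces A's loop that joins every k-window (and destructively pops the list) with a prefix-sum of string lengths to locate the best window index and a single final join; B does not mutate strarr (the equivalence is about the return value only).
import Mathlib
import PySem

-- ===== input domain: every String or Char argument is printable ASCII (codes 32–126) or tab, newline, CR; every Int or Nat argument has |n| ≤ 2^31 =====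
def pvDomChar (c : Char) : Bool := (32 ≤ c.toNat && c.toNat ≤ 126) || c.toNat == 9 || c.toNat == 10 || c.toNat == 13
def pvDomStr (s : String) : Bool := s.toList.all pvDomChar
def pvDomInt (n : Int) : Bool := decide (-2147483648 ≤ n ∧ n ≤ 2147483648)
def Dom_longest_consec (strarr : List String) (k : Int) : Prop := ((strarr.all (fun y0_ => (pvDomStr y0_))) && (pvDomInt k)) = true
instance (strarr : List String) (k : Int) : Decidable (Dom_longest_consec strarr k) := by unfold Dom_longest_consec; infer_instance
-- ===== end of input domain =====

-- B replaces A's per-window join (O(n*k*L), and A destructively pops strarr) with a prefix-sum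
-- of lengths locating the best window and a single join (O(n + k*L)); B does not mutate strarr,
-- so the equivalence proved here is about the return value only.

-- ===== PORT A =====
-- the for-loop of A: each pass joins the first k strings, keeps the longer, deletes the front
def lcLoopA (k : Int) : Nat → List String → String → String
  | 0, _, mx => mx
  | f + 1, lst, mx =>
      let a := PySem.Str.join "" (PySem.List.slice lst none (some k))
      lcLoopA k f lst.tail (if PySem.Str.len a > PySem.Str.len mx then a else mx)

def longest_consec (strarr : List String) (k : Int) : String :=
  if strarr.length = 0 ∨ k ≤ 0 then ""
  else lcLoopA k (((strarr.length : Int) - k + 1).toNat) strarr ""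

-- ===== PORT B =====
def longest_consec_alt (strarr : List String) (k : Int) : String :=
  let n := strarr.length
  if n = 0 ∨ k ≤ 0 ∨ (n : Int) < k then ""
  else
    let pref := strarr.foldl (fun acc s => acc ++ [acc.getLastD 0 + PySem.Str.len s]) [(0 : Int)]
    let init : Int × Int := (0, PySem.List.pyGetD pref k 0 - PySem.List.pyGetD pref 0 0)
    let best := (PySem.List.pyRange 1 ((n : Int) - k + 1) 1).foldl
      (fun (st : Int × Int) i =>
        let cur := PySem.List.pyGetD pref (i + k) 0 - PySem.List.pyGetD pref i 0
        if cur > st.2 then (i, cur) else st) init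
    PySem.Str.join "" (PySem.List.slice strarr (some best.1) (some (best.1 + k)))

-- ===== PRECONDITION & SPEC =====
def Spec_longest_consec (strarr : List String) (k : Int) (out : String) : Prop := out = longest_consec_alt strarr k
instance (strarr : List String) (k : Int) (out : String) : Decidable (Spec_longest_consec strarr k out) := by unfold Spec_longest_consec; infer_instance

-- ===== CLAIM (what is proved, stated in full; the proofs are below) =====
def Claim_equal_longest_consec : Prop := ∀ (strarr : List String) (k : Int), Dom_longest_consec strarr k → Spec_longest_consec strarr k (longest_consec strarr k)


-- ===== LEMMAS AND PROOFS =====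

-- length of a ""-join is the sum of the lengths
theorem lc_join_chars_len (ls : List (List Char)) :
    (PySem.Chars.join [] ls).length = (ls.map List.length).sum := by
  induction ls with
  | nil => simp [PySem.Chars.join_nil]
  | cons p rest ih =>
    cases rest with
    | nil => simp [PySem.Chars.join_singleton]
    | cons q r => rw [PySem.Chars.join_cons_cons]; simp_all

theorem lc_len_join (xs : List String) :
    PySem.Str.len (PySem.Str.join "" xs) = (xs.map PySem.Str.len).sum := by
  rw [PySem.Str.len_eq, PySem.Str.toList_join]
  have h0 : ("" : String).toList = [] := rfl
  rw [h0, lc_join_chars_len, Nat.cast_list_sum, List.map_map, List.map_map]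
  congr 1

-- prefix sums as built by B's first loop
def lcPrefix : List String → Int → List Int
  | [], c => [c]
  | s :: xs, c => c :: lcPrefix xs (c + PySem.Str.len s)

theorem lc_pref_build (xs : List String) : ∀ (acc : List Int) (c : Int),
    xs.foldl (fun acc s => acc ++ [acc.getLastD 0 + PySem.Str.len s]) (acc ++ [c])
      = acc ++ lcPrefix xs c := by
  induction xs with
  | nil => intro acc c; simp [lcPrefix]
  | cons s xs ih =>
    intro acc c
    simp only [List.foldl_cons, List.getLastD_concat, lcPrefix]
    have h := ih (acc ++ [c]) (c + PySem.Str.len s)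
    rw [h]
    simp

theorem lc_pref_get (xs : List String) : ∀ (c : Int) (i : Nat), i ≤ xs.length →
    PySem.List.pyGetD (lcPrefix xs c) (i : Int) 0 = c + ((xs.take i).map PySem.Str.len).sum := by
  induction xs with
  | nil =>
    intro c i hi
    have : i = 0 := by simpa using hi
    subst this
    simp [lcPrefix]
  | cons s xs ih =>
    intro c i hi
    rw [PySem.List.pyGetD_natCast]
    cases i with
    | zero => simp [lcPrefix]
    | succ j =>
      have hj : j ≤ xs.length := by simpa using hi
      have h := ih (c + PySem.Str.len s) j hj
      rw [PySem.List.pyGetD_natCast] at h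
      simp only [lcPrefix, List.getD_cons_succ, List.take_succ_cons, List.map_cons, List.sum_cons]
      rw [h]; ring

-- A's loop as a fold over window indices
theorem lc_loopA_eq (k : Int) (hk : 0 ≤ k) : ∀ (f : Nat) (lst : List String) (mx : String),
    lcLoopA k f lst mx =
      (List.range f).foldl
        (fun mx j =>
          let a := PySem.Str.join "" ((lst.drop j).take k.toNat)
          if PySem.Str.len a > PySem.Str.len mx then a else mx) mx := by
  intro f
  induction f with
  | zero => intro lst mx; simp [lcLoopA]
  | succ f ih =>
    intro lst mx
    simp only [lcLoopA, PySem.List.slice_to lst hk]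
    rw [ih]
    rw [List.range_succ_eq_map]
    simp only [List.foldl_cons, List.foldl_map, List.drop_zero]
    congr 1
    funext mx' j
    simp only [Nat.succ_eq_add_one, ← List.drop_one, List.drop_drop]
    rw [Nat.add_comm 1 j]

-- parallel invariant: A's keep-the-longer fold vs B's argmax fold over the same index list
theorem lc_parallel (S : Nat → Int) (W : Nat → String) (hSW : ∀ j, S j = PySem.Str.len (W j)) :
    ∀ (js : List Nat) (mx : String) (b : Nat) (bs : Int),
      bs = S b → PySem.Str.len mx = bs → (mx = W b ∨ mx = "") →
      (let mx' := js.foldl (fun mx j => if PySem.Str.len (W j) > PySem.Str.len mx then W j else mx) mx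
       let st' := js.foldl (fun (st : Nat × Int) j => if S j > st.2 then (j, S j) else st) (b, bs)
       st'.2 = S st'.1 ∧ PySem.Str.len mx' = st'.2 ∧ (mx' = W st'.1 ∨ mx' = "")) := by
  intro js
  induction js with
  | nil =>
    intro mx b bs h1 h2 h3
    exact ⟨h1, h2, h3⟩
  | cons j js ih =>
    intro mx b bs h1 h2 h3
    simp only [List.foldl_cons]
    rw [show PySem.Str.len (W j) = S j from (hSW j).symm, h2]
    by_cases hgt : S j > bs
    · simp only [if_pos hgt]
      exact ih (W j) j (S j) rfl (hSW j).symm (Or.inl rfl)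
    · simp only [if_neg hgt]
      exact ih mx b bs h1 h2 h3

-- B's Int-indexed argmax fold mirrored on Nat indices
theorem lc_fold_cast (f : Int → Int) (S : Nat → Int) :
    ∀ (js : List Nat), (∀ j ∈ js, f ((j : Nat) : Int) = S j) → ∀ (b : Nat) (bs : Int),
      (js.map (fun j => ((j : Nat) : Int))).foldl
          (fun (st : Int × Int) i => if f i > st.2 then (i, f i) else st) ((b : Int), bs)
        = (((js.foldl (fun (st : Nat × Int) j => if S j > st.2 then (j, S j) else st) (b, bs)).1 : Int),
           (js.foldl (fun (st : Nat × Int) j => if S j > st.2 then (j, S j) else st) (b, bs)).2) := by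
  intro js
  induction js with
  | nil => intro _ b bs; simp
  | cons j js ih =>
    intro hf b bs
    have hj : f ((j : Nat) : Int) = S j := hf j (by simp)
    have hf' : ∀ x ∈ js, f ((x : Nat) : Int) = S x := fun x hx => hf x (by simp [hx])
    simp only [List.map_cons, List.foldl_cons, hj]
    by_cases hgt : S j > bs
    · simp only [if_pos hgt]; exact ih hf' j (S j)
    · simp only [if_neg hgt]; exact ih hf' b bs

-- a string of length 0 is ""
theorem lc_len_zero (s : String) (h : PySem.Str.len s = 0) : s = "" := by
  rw [PySem.Str.len_eq] at h
  have h1 : s.toList.length = 0 := by exact_mod_cast h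
  have h2 : s.toList = [] := List.length_eq_zero_iff.mp h1
  have h3 : ("" : String).toList = [] := rfl
  exact String.toList_inj.mp (by rw [h2, h3])

-- window sum from prefix sums
theorem lc_window_sum (strarr : List String) (kn : Nat) (j : Nat) (h : j + kn ≤ strarr.length) :
    PySem.List.pyGetD (lcPrefix strarr 0) ((j : Int) + (kn : Int)) 0
      - PySem.List.pyGetD (lcPrefix strarr 0) (j : Int) 0
      = PySem.Str.len (PySem.Str.join "" ((strarr.drop j).take kn)) := by
  have h1 := lc_pref_get strarr 0 (j + kn) (by omega)
  have h2 := lc_pref_get strarr 0 j (by omega)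
  rw [show ((j : Int) + (kn : Int)) = (((j + kn : Nat) : Int)) by push_cast; ring]
  rw [h1, h2, lc_len_join, List.take_add, List.map_append, List.sum_append]
  ring

-- ===== VERDICT (by name: the statement is the Claim_ definition above) =====
set_option maxHeartbeats 1000000 in
theorem longest_consec_spec : Claim_equal_longest_consec := by
  intro strarr k _
  unfold Spec_longest_consec
  by_cases hA : strarr.length = 0 ∨ k ≤ 0
  · rcases hA with h | h
    · simp [longest_consec, longest_consec_alt, h]
    · simp [longest_consec, longest_consec_alt, h]
  obtain ⟨hn, hk⟩ := not_or.mp hA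
  by_cases hbig : (strarr.length : Int) < k
  · have hf : ((strarr.length : Int) - k + 1).toNat = 0 := by omega
    rw [longest_consec, longest_consec_alt, if_neg (by omega), if_pos (by omega), hf]
    rfl
  have hn' : 0 < strarr.length := Nat.pos_of_ne_zero hn
  have hkc : ((k.toNat : Nat) : Int) = k := by omega
  have hkn1 : 1 ≤ k.toNat := by omega
  have hknn : k.toNat ≤ strarr.length := by omega
  simp only [longest_consec, longest_consec_alt]
  rw [if_neg (by omega), if_neg (by omega)]
  have hpref := lc_pref_build strarr [] 0
  simp only [List.nil_append] at hpref
  rw [hpref]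
  have hfuel : ((strarr.length : Int) - k + 1).toNat = (strarr.length - k.toNat) + 1 := by omega
  rw [lc_loopA_eq k (by omega), hfuel]
  -- B's index list as casts of Nat indices
  have hr : PySem.List.pyRange 1 ((strarr.length : Int) - k + 1) 1
      = ((List.range (strarr.length - k.toNat)).map Nat.succ).map (fun j : Nat => (j : Int)) := by
    rw [PySem.List.pyRange_one]
    rw [show ((strarr.length : Int) - k + 1 - 1).toNat = strarr.length - k.toNat by omega]
    rw [List.map_map]
    refine List.map_congr_left ?_
    intro x _
    simp only [Function.comp_apply]
    push_cast
    ring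
  rw [hr]
  -- initial best sum
  have hinit : PySem.List.pyGetD (lcPrefix strarr 0) k 0 - PySem.List.pyGetD (lcPrefix strarr 0) 0 0
      = PySem.Str.len (PySem.Str.join "" ((strarr.drop 0).take k.toNat)) := by
    have h := lc_window_sum strarr k.toNat 0 (by omega)
    simpa [hkc] using h
  rw [hinit]
  -- B's Int fold mirrored on Nat indices
  have hfj : ∀ j ∈ (List.range (strarr.length - k.toNat)).map Nat.succ,
      (fun i => PySem.List.pyGetD (lcPrefix strarr 0) (i + k) 0
                  - PySem.List.pyGetD (lcPrefix strarr 0) i 0) ((j : Nat) : Int)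
        = (fun j : Nat => PySem.Str.len (PySem.Str.join "" ((strarr.drop j).take k.toNat))) j := by
    intro j hj
    simp only [List.mem_map, List.mem_range] at hj
    obtain ⟨x, hx, rfl⟩ := hj
    have h := lc_window_sum strarr k.toNat (x + 1) (by omega)
    simpa [hkc, Nat.succ_eq_add_one] using h
  have hcast := lc_fold_cast
      (fun i => PySem.List.pyGetD (lcPrefix strarr 0) (i + k) 0
                  - PySem.List.pyGetD (lcPrefix strarr 0) i 0)
      (fun j : Nat => PySem.Str.len (PySem.Str.join "" ((strarr.drop j).take k.toNat)))
      ((List.range (strarr.length - k.toNat)).map Nat.succ) hfj 0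
      (PySem.Str.len (PySem.Str.join "" ((strarr.drop 0).take k.toNat)))
  rw [show (((0 : Nat) : Int)) = (0 : Int) by simp] at hcast
  rw [hcast]
  simp only []
  -- the slice at the best index is the best window
  have hslice : ∀ (a : Nat),
      PySem.List.slice strarr (some ((a : Nat) : Int)) (some (((a : Nat) : Int) + k))
        = (strarr.drop a).take k.toNat := by
    intro a
    rw [show (((a : Nat) : Int) + k) = (((a : Nat) : Int) + ((k.toNat : Nat) : Int)) by rw [hkc]]
    exact PySem.List.slice_natCast_add strarr a k.toNat
  rw [hslice]
  -- A's fold: peel off index 0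
  rw [List.range_succ_eq_map]
  simp only [List.foldl_cons]
  -- the parallel invariant
  have hlen0 : PySem.Str.len "" = 0 := by
    have h : ("" : String).toList = [] := rfl
    simp [PySem.Str.len_eq, h]
  have hW0nn : (0 : Int) ≤ PySem.Str.len (PySem.Str.join "" ((strarr.drop 0).take k.toNat)) := by
    rw [PySem.Str.len_eq]; exact Int.natCast_nonneg _
  obtain ⟨e1, e2, e3⟩ := lc_parallel
      (fun j : Nat => PySem.Str.len (PySem.Str.join "" ((strarr.drop j).take k.toNat)))
      (fun j : Nat => PySem.Str.join "" ((strarr.drop j).take k.toNat))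
      (fun j => rfl)
      ((List.range (strarr.length - k.toNat)).map Nat.succ)
      (if PySem.Str.len (PySem.Str.join "" ((strarr.drop 0).take k.toNat)) > PySem.Str.len "" then
        PySem.Str.join "" ((strarr.drop 0).take k.toNat) else "")
      0
      (PySem.Str.len (PySem.Str.join "" ((strarr.drop 0).take k.toNat)))
      rfl
      (by
        by_cases h : PySem.Str.len (PySem.Str.join "" ((strarr.drop 0).take k.toNat)) > PySem.Str.len ""
        · rw [if_pos h]
        · rw [if_neg h, hlen0]
          rw [hlen0] at h
          omega)
      (by
        by_cases h : PySem.Str.len (PySem.Str.join "" ((strarr.drop 0).take k.toNat)) > PySem.Str.len ""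
        · left; rw [if_pos h]
        · right; rw [if_neg h])
  rcases e3 with h | h
  · exact h
  · rw [h, hlen0] at e2
    rw [← e2] at e1
    exact h.trans (lc_len_zero _ e1.symm).symm
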